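-- pv_equiv track=rewrite | github.com/dcastello-data/tucuvi-data-chat | chat.py | get_last_interactions
-- ===== SOURCE A (Python) =====
-- def get_last_interactions(messages, user_turns=2, assistant_turns=2):
--     """Get the last user/assistant messages for conversation continuity."""
--     last_interactions = []
--     reversed_messages = list(reversed(messages))
--     user_count = 0
--     assistant_count = 0
--     for msg in reversed_messages:
--         if msg["role"] == "assistant" and assistant_count < assistant_turns:
--             last_interactions.insert(0, msg)
--             assistant_count += 1
--         elif msg["role"] == "user" and user_count < user_turns:
--             last_interactions.insert(0, msg)
--             user_count += 1
--         if user_count == user_turns and assistant_count == assistant_turns: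
--             break
--     return last_interactions
-- ===== SOURCE B (Python) =====
-- def get_last_interactions(messages, user_turns=2, assistant_turns=2):
--     """Count-then-filter: keep the last user_turns user messages and last
--     assistant_turns assistant messages, in one forward pass over messages."""
--     total_u = sum(1 for m in messages if m.get("role") == "user")
--     total_a = sum(1 for m in messages if m.get("role") == "assistant")
--     out = []
--     seen_u = 0
--     seen_a = 0
--     for m in messages:
--         r = m.get("role")
--         if r == "user":
--             if seen_u >= total_u - user_turns:
--                 out.append(m)
--             seen_u += 1
--         elif r == "assistant":
--             if seen_a >= total_a - assistant_turns:
--                 out.append(m)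
--             seen_a += 1
--     return out
-- ===== Notes on version B (the rewrite author's own statement) =====
-- stated objective: alternative
-- what changed: Replaced A's reverse scan with quota counters, insert(0) and an early break by a count-then-filter scheme: count users/assistants once, then one forward pass keeping a message iff it is among the last user_turns/assistant_turns of its role.
import Mathlib
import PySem

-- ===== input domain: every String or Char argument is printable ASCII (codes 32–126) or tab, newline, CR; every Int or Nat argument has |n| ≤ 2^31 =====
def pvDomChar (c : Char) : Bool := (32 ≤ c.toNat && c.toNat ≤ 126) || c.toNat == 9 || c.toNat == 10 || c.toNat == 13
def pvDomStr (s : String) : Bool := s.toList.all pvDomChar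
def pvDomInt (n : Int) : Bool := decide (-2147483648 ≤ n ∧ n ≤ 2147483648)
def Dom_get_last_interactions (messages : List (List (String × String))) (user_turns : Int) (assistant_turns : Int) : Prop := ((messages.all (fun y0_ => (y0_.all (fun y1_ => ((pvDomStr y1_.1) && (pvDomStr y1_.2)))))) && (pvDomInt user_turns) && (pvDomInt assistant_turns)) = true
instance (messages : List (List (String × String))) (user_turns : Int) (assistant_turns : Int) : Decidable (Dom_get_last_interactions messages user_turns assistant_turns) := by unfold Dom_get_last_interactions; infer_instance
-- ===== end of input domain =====

-- B replaces A's reverse scan / quota counters / insert(0) / early break by a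
-- count-then-forward-filter decomposition; same cost, different structure.

-- msg["role"] : first-match lookup; `getD ""` is only reached where the Python
-- raises KeyError (excluded by Pre_ below; "" matches neither role string).
def pvRole (m : List (String × String)) : String :=
  ((PySem.Dict.mk m).get? "role").getD ""

-- ===== PORT A =====
-- the for-loop of A: state (user_count, assistant_count, last_interactions);
-- insert(0, msg) = msg :: acc; the `break` returns acc as A's loop does.
def pvALoop (user_turns assistant_turns : Int) :
    List (List (String × String)) → Int → Int → List (List (String × String)) →
    List (List (String × String))
  | [], _, _, acc => acc
  | msg :: rest, uc, ac, acc =>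
    if pvRole msg = "assistant" ∧ ac < assistant_turns then
      if uc = user_turns ∧ ac + 1 = assistant_turns then msg :: acc
      else pvALoop user_turns assistant_turns rest uc (ac + 1) (msg :: acc)
    else if pvRole msg = "user" ∧ uc < user_turns then
      if uc + 1 = user_turns ∧ ac = assistant_turns then msg :: acc
      else pvALoop user_turns assistant_turns rest (uc + 1) ac (msg :: acc)
    else
      if uc = user_turns ∧ ac = assistant_turns then acc
      else pvALoop user_turns assistant_turns rest uc ac acc

def get_last_interactions (messages : List (List (String × String))) (user_turns : Int) (assistant_turns : Int) : List (List (String × String)) :=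
  pvALoop user_turns assistant_turns messages.reverse 0 0 []

-- ===== PORT B =====
-- Source B's second loop: seen counters per role, append = ++ [m] via front recursion.
def pvBLoop (thU thA : Int) :
    List (List (String × String)) → Int → Int → List (List (String × String))
  | [], _, _ => []
  | m :: rest, su, sa =>
    if pvRole m = "user" then
      (if su ≥ thU then [m] else []) ++ pvBLoop thU thA rest (su + 1) sa
    else if pvRole m = "assistant" then
      (if sa ≥ thA then [m] else []) ++ pvBLoop thU thA rest su (sa + 1)
    else pvBLoop thU thA rest su sa

def get_last_interactions_alt (messages : List (List (String × String))) (user_turns : Int) (assistant_turns : Int) : List (List (String × String)) :=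
  let total_u : Int := (messages.filter (fun m => pvRole m = "user")).length
  let total_a : Int := (messages.filter (fun m => pvRole m = "assistant")).length
  pvBLoop (total_u - user_turns) (total_a - assistant_turns) messages 0 0

-- ===== PRECONDITION & SPEC =====
-- Pre_ excludes messages lacking a "role" key: on those A raises KeyError,
-- except when the early break stops the scan before reaching them, in which
-- case A returns the same value B does (see the cite in claim.json).
def Pre_get_last_interactions (messages : List (List (String × String))) (user_turns : Int) (assistant_turns : Int) : Prop :=
  ∀ m ∈ messages, ((PySem.Dict.mk m).get? "role").isSome
instance (messages : List (List (String × String))) (user_turns : Int) (assistant_turns : Int) : Decidable (Pre_get_last_interactions messages user_turns assistant_turns) := by unfold Pre_get_last_interactions; infer_instance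

def pvWitness_get_last_interactions : (List (List (String × String))) × Int × Int :=
  ([[("role", "user"), ("content", "hi")], [("role", "assistant"), ("content", "yo")]], 2, 2)

def Spec_get_last_interactions (messages : List (List (String × String))) (user_turns : Int) (assistant_turns : Int) (out : List (List (String × String))) : Prop := out = get_last_interactions_alt messages user_turns assistant_turns
instance (messages : List (List (String × String))) (user_turns : Int) (assistant_turns : Int) (out : List (List (String × String))) : Decidable (Spec_get_last_interactions messages user_turns assistant_turns out) := by unfold Spec_get_last_interactions; infer_instance

-- ===== CLAIM (what is proved, stated in full; the proofs are below) =====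
def Claim_equal_get_last_interactions : Prop := ∀ (messages : List (List (String × String))) (user_turns : Int) (assistant_turns : Int), Dom_get_last_interactions messages user_turns assistant_turns → Pre_get_last_interactions messages user_turns assistant_turns → Spec_get_last_interactions messages user_turns assistant_turns (get_last_interactions messages user_turns assistant_turns)

-- ===== LEMMAS AND PROOFS =====

-- reference form of A's loop: remaining budgets instead of counters, no acc/break
def pvH : -- budgets for users/assistants are the last two args
    List (List (String × String)) → Int → Int → List (List (String × String))
  | [], _, _ => []
  | m :: rest, bu, ba =>
    if pvRole m = "assistant" ∧ 0 < ba then pvH rest bu (ba - 1) ++ [m]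
    else if pvRole m = "user" ∧ 0 < bu then pvH rest (bu - 1) ba ++ [m]
    else pvH rest bu ba

theorem pvH_zero (l : List (List (String × String))) :
    pvH l 0 0 = [] := by
  induction l with
  | nil => rfl
  | cons m rest ih =>
    simp only [pvH]
    have h1 : ¬ (pvRole m = "assistant" ∧ (0:Int) < 0) := fun h => absurd h.2 (lt_irrefl 0)
    have h2 : ¬ (pvRole m = "user" ∧ (0:Int) < 0) := fun h => absurd h.2 (lt_irrefl 0)
    rw [if_neg h1, if_neg h2, ih]

theorem pvALoop_eq_pvH (ut at_ : Int) (l : List (List (String × String)))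
    (uc ac : Int) (acc : List (List (String × String))) :
    pvALoop ut at_ l uc ac acc = pvH l (ut - uc) (at_ - ac) ++ acc := by
  induction l generalizing uc ac acc with
  | nil => rfl
  | cons m rest ih =>
    simp only [pvALoop, pvH]
    by_cases hA : pvRole m = "assistant" ∧ ac < at_
    · have hA' : pvRole m = "assistant" ∧ 0 < at_ - ac := ⟨hA.1, by omega⟩
      rw [if_pos hA, if_pos hA']
      by_cases hbrk : uc = ut ∧ ac + 1 = at_
      · rw [if_pos hbrk]
        have : ut - uc = 0 := by omega
        have h2 : at_ - ac - 1 = 0 := by omega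
        rw [this, h2, pvH_zero]; rfl
      · rw [if_neg hbrk, ih]
        have : at_ - (ac + 1) = at_ - ac - 1 := by ring
        rw [this, List.append_assoc]; rfl
    · have hA' : ¬ (pvRole m = "assistant" ∧ 0 < at_ - ac) := by
        intro h; exact hA ⟨h.1, by omega⟩
      rw [if_neg hA, if_neg hA']
      by_cases hU : pvRole m = "user" ∧ uc < ut
      · have hU' : pvRole m = "user" ∧ 0 < ut - uc := ⟨hU.1, by omega⟩
        rw [if_pos hU, if_pos hU']
        by_cases hbrk : uc + 1 = ut ∧ ac = at_
        · rw [if_pos hbrk]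
          have h1 : ut - uc - 1 = 0 := by omega
          have h2 : at_ - ac = 0 := by omega
          rw [h1, h2, pvH_zero]; rfl
        · rw [if_neg hbrk, ih]
          have : ut - (uc + 1) = ut - uc - 1 := by ring
          rw [this, List.append_assoc]; rfl
      · have hU' : ¬ (pvRole m = "user" ∧ 0 < ut - uc) := by
          intro h; exact hU ⟨h.1, by omega⟩
        rw [if_neg hU, if_neg hU']
        by_cases hbrk : uc = ut ∧ ac = at_
        · rw [if_pos hbrk]
          have h1 : ut - uc = 0 := by omega
          have h2 : at_ - ac = 0 := by omega
          rw [h1, h2, pvH_zero]; rfl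
        · rw [if_neg hbrk, ih]

-- counts of each role in a list
def pvCU (l : List (List (String × String))) : Int :=
  ((l.filter (fun m => pvRole m = "user")).length : Int)
def pvCA (l : List (List (String × String))) : Int :=
  ((l.filter (fun m => pvRole m = "assistant")).length : Int)

theorem pvBLoop_snoc (thU thA : Int) (xs : List (List (String × String)))
    (x : List (String × String)) (su sa : Int) :
    pvBLoop thU thA (xs ++ [x]) su sa =
      pvBLoop thU thA xs su sa ++
        (if pvRole x = "user" then (if su + pvCU xs ≥ thU then [x] else [])
         else if pvRole x = "assistant" then (if sa + pvCA xs ≥ thA then [x] else [])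
         else []) := by
  induction xs generalizing su sa with
  | nil =>
    simp only [List.nil_append, pvBLoop, pvCU, pvCA, List.filter_nil, List.length_nil]
    norm_num
  | cons m rest ih =>
    simp only [List.cons_append, pvBLoop]
    by_cases h1 : pvRole m = "user"
    · rw [if_pos h1, if_pos h1, ih]
      have hcu : pvCU (m :: rest) = pvCU rest + 1 := by
        simp [pvCU, h1]
      have hca : pvCA (m :: rest) = pvCA rest := by
        simp [pvCA, h1]
      rw [hcu, hca, List.append_assoc]
      have : su + 1 + pvCU rest = su + (pvCU rest + 1) := by ring
      rw [this]
    · rw [if_neg h1, if_neg h1]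
      by_cases h2 : pvRole m = "assistant"
      · rw [if_pos h2, if_pos h2, ih]
        have hcu : pvCU (m :: rest) = pvCU rest := by
          simp [pvCU, h1]
        have hca : pvCA (m :: rest) = pvCA rest + 1 := by
          simp [pvCA, h2]
        rw [hcu, hca, List.append_assoc]
        have : sa + 1 + pvCA rest = sa + (pvCA rest + 1) := by ring
        rw [this]
      · rw [if_neg h2, if_neg h2, ih]
        have hcu : pvCU (m :: rest) = pvCU rest := by
          simp [pvCU, h1]
        have hca : pvCA (m :: rest) = pvCA rest := by
          simp [pvCA, h2]
        rw [hcu, hca]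

-- main bridge: A's reference form on the reversed list = B's loop forward
theorem pvH_eq_pvBLoop (l : List (List (String × String)))
    (bu ba thU thA su sa : Int)
    (hU : thU = su + pvCU l - bu ∨ (bu ≤ 0 ∧ su + pvCU l ≤ thU))
    (hA : thA = sa + pvCA l - ba ∨ (ba ≤ 0 ∧ sa + pvCA l ≤ thA)) :
    pvH l.reverse bu ba = pvBLoop thU thA l su sa := by
  induction l using List.reverseRecOn generalizing bu ba thU thA su sa with
  | nil => rfl
  | append_singleton xs x ih =>
    rw [List.reverse_append, List.reverse_singleton, List.singleton_append]
    rw [pvBLoop_snoc]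
    have hcuapp : pvCU (xs ++ [x]) = pvCU xs + (if pvRole x = "user" then 1 else 0) := by
      by_cases h : pvRole x = "user" <;> simp [pvCU, List.filter_append, h]
    have hcaapp : pvCA (xs ++ [x]) = pvCA xs + (if pvRole x = "assistant" then 1 else 0) := by
      by_cases h : pvRole x = "assistant" <;> simp [pvCA, List.filter_append, h]
    simp only [pvH]
    by_cases hxa : pvRole x = "assistant"
    · have hxu : ¬ pvRole x = "user" := by rw [hxa]; decide
      rw [if_neg hxu, if_pos hxa]
      have hcu : pvCU (xs ++ [x]) = pvCU xs := by rw [hcuapp, if_neg hxu]; ring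
      have hca : pvCA (xs ++ [x]) = pvCA xs + 1 := by rw [hcaapp, if_pos hxa]
      rw [hcu] at hU; rw [hca] at hA
      by_cases hba : 0 < ba
      · have htail : sa + pvCA xs ≥ thA := by rcases hA with h | h <;> omega
        rw [if_pos htail, if_pos ⟨hxa, hba⟩]
        have hA' : thA = sa + pvCA xs - (ba - 1) := by rcases hA with h | h <;> omega
        rw [ih bu (ba - 1) thU thA su sa hU (Or.inl hA')]
      · have htail : ¬ sa + pvCA xs ≥ thA := by rcases hA with h | h <;> omega
        rw [if_neg htail, List.append_nil,
            if_neg (fun h : pvRole x = "assistant" ∧ 0 < ba => hba h.2),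
            if_neg (fun h : pvRole x = "user" ∧ 0 < bu => hxu h.1)]
        exact ih bu ba thU thA su sa hU
          (Or.inr ⟨by omega, by rcases hA with h | h <;> omega⟩)
    · by_cases hxu : pvRole x = "user"
      · rw [if_pos hxu]
        have hcu : pvCU (xs ++ [x]) = pvCU xs + 1 := by rw [hcuapp, if_pos hxu]
        have hca : pvCA (xs ++ [x]) = pvCA xs := by rw [hcaapp, if_neg hxa]; ring
        rw [hcu] at hU; rw [hca] at hA
        rw [if_neg (fun h : pvRole x = "assistant" ∧ 0 < ba => hxa h.1)]
        by_cases hbu : 0 < bu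
        · have htail : su + pvCU xs ≥ thU := by rcases hU with h | h <;> omega
          rw [if_pos htail, if_pos ⟨hxu, hbu⟩]
          have hU' : thU = su + pvCU xs - (bu - 1) := by rcases hU with h | h <;> omega
          rw [ih (bu - 1) ba thU thA su sa (Or.inl hU') hA]
        · have htail : ¬ su + pvCU xs ≥ thU := by rcases hU with h | h <;> omega
          rw [if_neg htail, List.append_nil,
              if_neg (fun h : pvRole x = "user" ∧ 0 < bu => hbu h.2)]
          exact ih bu ba thU thA su sa
            (Or.inr ⟨by omega, by rcases hU with h | h <;> omega⟩) hA
      · have hcu : pvCU (xs ++ [x]) = pvCU xs := by rw [hcuapp, if_neg hxu]; ring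
        have hca : pvCA (xs ++ [x]) = pvCA xs := by rw [hcaapp, if_neg hxa]; ring
        rw [hcu] at hU; rw [hca] at hA
        rw [if_neg hxu, if_neg hxa, List.append_nil,
            if_neg (fun h : pvRole x = "assistant" ∧ 0 < ba => hxa h.1),
            if_neg (fun h : pvRole x = "user" ∧ 0 < bu => hxu h.1)]
        exact ih bu ba thU thA su sa hU hA

-- ===== VERDICT (by name: the statement is the Claim_ definition above) =====
theorem get_last_interactions_spec : Claim_equal_get_last_interactions := by
  intro messages ut at_ _ _
  unfold Spec_get_last_interactions get_last_interactions get_last_interactions_alt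
  rw [pvALoop_eq_pvH, List.append_nil, sub_zero, sub_zero]
  show pvH messages.reverse ut at_ = pvBLoop (pvCU messages - ut) (pvCA messages - at_) messages 0 0
  exact pvH_eq_pvBLoop messages ut at_ (pvCU messages - ut) (pvCA messages - at_) 0 0
    (Or.inl (by ring)) (Or.inl (by ring))
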